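-- pv_equiv track=rewrite | github.com/chernistry/bernstein | src/bernstein/github_app/mapper.py | _role_from_labels
-- ===== SOURCE A (Python) =====
-- _SECURITY_LABELS = frozenset({"security", "vulnerability", "cve", "security-bug"})
--
-- _DOCS_LABELS = frozenset({"documentation", "docs", "doc"})
--
-- _QA_LABELS = frozenset({"test", "tests", "testing", "qa"})
--
-- def _role_from_labels(labels: list[str]) -> str:
--     """Determine the most appropriate Bernstein role from GitHub label names."""
--     lower = {lbl.lower() for lbl in labels}
--     if lower & _SECURITY_LABELS:
--         return "security"
--     if lower & _DOCS_LABELS: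
--         return "docs"
--     if lower & _QA_LABELS:
--         return "qa"
--     # bug / fix labels and the default both land on backend
--     return "backend"
-- ===== SOURCE B (Python) =====
-- _LABEL_ROLE = {
--     "security": (0, "security"),
--     "vulnerability": (0, "security"),
--     "cve": (0, "security"),
--     "security-bug": (0, "security"),
--     "documentation": (1, "docs"),
--     "docs": (1, "docs"),
--     "doc": (1, "docs"),
--     "test": (2, "qa"),
--     "tests": (2, "qa"),
--     "testing": (2, "qa"),
--     "qa": (2, "qa"),
-- }
--
--
-- def _role_from_labels(labels: list[str]) -> str:
--     """Determine the most appropriate Bernstein role from GitHub label names."""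
--     best = None
--     for lbl in labels:
--         hit = _LABEL_ROLE.get(lbl.lower())
--         if hit is not None and (best is None or hit[0] < best[0]):
--             best = hit
--     return best[1] if best is not None else "backend"
-- ===== Notes on version B (the rewrite author's own statement) =====
-- stated objective: alternative
-- what changed: Replaced the three set-intersection checks over a deduplicated lowered-label set by one combined label->(priority,role) lookup table and a single min-priority reduction over the labels.
import Mathlib
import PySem

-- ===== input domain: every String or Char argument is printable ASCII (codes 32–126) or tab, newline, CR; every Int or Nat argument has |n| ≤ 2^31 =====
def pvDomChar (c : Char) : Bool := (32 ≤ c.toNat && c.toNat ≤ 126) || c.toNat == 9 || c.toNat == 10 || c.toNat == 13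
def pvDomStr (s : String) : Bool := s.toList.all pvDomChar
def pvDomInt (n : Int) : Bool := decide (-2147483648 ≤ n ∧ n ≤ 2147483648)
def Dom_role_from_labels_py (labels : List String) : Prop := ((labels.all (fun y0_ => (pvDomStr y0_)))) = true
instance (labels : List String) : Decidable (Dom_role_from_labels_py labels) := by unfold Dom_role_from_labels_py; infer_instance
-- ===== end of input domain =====

-- B replaces A's three set intersections by one label->(priority,role) table and a
-- single min-priority pass over the labels (objective: alternative structure, same cost).

-- ===== PORT A =====
def pvSecL : List String := ["security", "vulnerability", "cve", "security-bug"]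
def pvDocsL : List String := ["documentation", "docs", "doc"]
def pvQaL : List String := ["test", "tests", "testing", "qa"]

-- the module-level frozensets (set order is irrelevant here: only membership/intersection emptiness is used)
def pvSecurityLabels : PySem.Set String := PySem.Set.ofList pvSecL
def pvDocsLabels : PySem.Set String := PySem.Set.ofList pvDocsL
def pvQaLabels : PySem.Set String := PySem.Set.ofList pvQaL

def role_from_labels_py (labels : List String) : String :=
  let lower : PySem.Set String := PySem.Set.ofList (labels.map PySem.Str.lower)
  if PySem.Set.inter lower pvSecurityLabels ≠ [] then "security"
  else if PySem.Set.inter lower pvDocsLabels ≠ [] then "docs"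
  else if PySem.Set.inter lower pvQaLabels ≠ [] then "qa"
  else "backend"

-- ===== PORT B =====
def pvLabelRole : PySem.Dict String (Int × String) :=
  PySem.Dict.ofList
  [("security", (0, "security")), ("vulnerability", (0, "security")),
   ("cve", (0, "security")), ("security-bug", (0, "security")),
   ("documentation", (1, "docs")), ("docs", (1, "docs")), ("doc", (1, "docs")),
   ("test", (2, "qa")), ("tests", (2, "qa")), ("testing", (2, "qa")), ("qa", (2, "qa"))]

def role_from_labels_py_alt (labels : List String) : String :=
  match labels.foldl (fun best lbl =>
      match PySem.Dict.get? pvLabelRole (PySem.Str.lower lbl), best with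
      | some hit, none => some hit
      | some hit, some b => if hit.1 < b.1 then some hit else some b
      | none, _ => best) (none : Option (Int × String)) with
  | some b => b.2
  | none => "backend"

-- ===== PRECONDITION & SPEC =====
def Spec_role_from_labels_py (labels : List String) (out : String) : Prop := out = role_from_labels_py_alt labels
instance (labels : List String) (out : String) : Decidable (Spec_role_from_labels_py labels out) := by unfold Spec_role_from_labels_py; infer_instance

-- ===== CLAIM (what is proved, stated in full; the proofs are below) =====
def Claim_equal_role_from_labels_py : Prop := ∀ (labels : List String), Dom_role_from_labels_py labels → Spec_role_from_labels_py labels (role_from_labels_py labels)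

-- ===== LEMMAS AND PROOFS =====

def pvLk (lbl : String) : Option (Int × String) :=
  PySem.Dict.get? pvLabelRole (PySem.Str.lower lbl)

def pvMerge : Option (Int × String) → Option (Int × String) → Option (Int × String)
  | b, none => b
  | none, some h => some h
  | some b, some h => if h.1 < b.1 then some h else some b

def pvF (l : List String) : Option (Int × String) :=
  l.foldl (fun b lbl => pvMerge b (pvLk lbl)) none

theorem pvStep_funext :
    (fun (best : Option (Int × String)) (lbl : String) =>
      match PySem.Dict.get? pvLabelRole (PySem.Str.lower lbl), best with
      | some hit, none => some hit
      | some hit, some b => if hit.1 < b.1 then some hit else some b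
      | none, _ => best) = fun b lbl => pvMerge b (pvLk lbl) := by
  funext b lbl
  unfold pvLk pvMerge
  cases PySem.Dict.get? pvLabelRole (PySem.Str.lower lbl) <;> cases b <;> rfl

theorem pvMerge_none_left (x : Option (Int × String)) : pvMerge none x = x := by
  cases x <;> rfl

theorem pvMerge_none_right (x : Option (Int × String)) : pvMerge x none = x := by
  cases x <;> rfl

theorem pvMerge_some_some (p q : Int) (r s : String) :
    pvMerge (some (p, r)) (some (q, s)) = if q < p then some (q, s) else some (p, r) := rfl

theorem pvMerge_assoc (a b c : Option (Int × String)) :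
    pvMerge (pvMerge a b) c = pvMerge a (pvMerge b c) := by
  rcases a with _ | ⟨p, r⟩
  · rw [pvMerge_none_left, pvMerge_none_left]
  · rcases b with _ | ⟨q, s⟩
    · rw [pvMerge_none_right, pvMerge_none_left]
    · rcases c with _ | ⟨u, v⟩
      · rw [pvMerge_none_right, pvMerge_none_right]
      · rw [pvMerge_some_some, pvMerge_some_some]
        split_ifs <;>
          first
            | rfl
            | omega
            | (simp only [pvMerge_some_some]; split_ifs <;> first | rfl | omega)

theorem pvFoldl_merge (l : List String) (b : Option (Int × String)) :
    l.foldl (fun b lbl => pvMerge b (pvLk lbl)) b = pvMerge b (pvF l) := by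
  induction l generalizing b with
  | nil => simp [pvF, pvMerge_none_right]
  | cons h t ih =>
    show List.foldl _ (pvMerge b (pvLk h)) t = _
    rw [ih]
    have : pvF (h :: t) = pvMerge (pvLk h) (pvF t) := by
      show List.foldl _ (pvMerge none (pvLk h)) t = _
      rw [pvMerge_none_left, ih]
    rw [this, pvMerge_assoc]

theorem pvLk_eq (lbl : String) : pvLk lbl =
    if PySem.Str.lower lbl ∈ pvSecL then some (0, "security")
    else if PySem.Str.lower lbl ∈ pvDocsL then some (1, "docs")
    else if PySem.Str.lower lbl ∈ pvQaL then some (2, "qa")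
    else none := by
  unfold pvLk
  generalize PySem.Str.lower lbl = s
  by_cases h1 : s ∈ pvSecL
  · rw [if_pos h1]
    simp only [pvSecL, List.mem_cons, List.not_mem_nil, or_false] at h1
    rcases h1 with rfl | rfl | rfl | rfl <;> decide
  · rw [if_neg h1]
    by_cases h2 : s ∈ pvDocsL
    · rw [if_pos h2]
      simp only [pvDocsL, List.mem_cons, List.not_mem_nil, or_false] at h2
      rcases h2 with rfl | rfl | rfl <;> decide
    · rw [if_neg h2]
      by_cases h3 : s ∈ pvQaL
      · rw [if_pos h3]
        simp only [pvQaL, List.mem_cons, List.not_mem_nil, or_false] at h3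
        rcases h3 with rfl | rfl | rfl | rfl <;> decide
      · rw [if_neg h3]
        simp only [pvSecL, pvDocsL, pvQaL, List.mem_cons, List.not_mem_nil,
          or_false, not_or] at h1 h2 h3
        obtain ⟨n1, n2, n3, n4⟩ := h1
        obtain ⟨n5, n6, n7⟩ := h2
        obtain ⟨n8, n9, n10, n11⟩ := h3
        have hm : pvLabelRole = PySem.Dict.mk
            [("security", (0, "security")), ("vulnerability", (0, "security")),
             ("cve", (0, "security")), ("security-bug", (0, "security")),
             ("documentation", (1, "docs")), ("docs", (1, "docs")), ("doc", (1, "docs")),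
             ("test", (2, "qa")), ("tests", (2, "qa")), ("testing", (2, "qa")),
             ("qa", (2, "qa"))] := by decide
        rw [hm]
        simp [beq_iff_eq, PySem.Dict.get?, Ne.symm n1, Ne.symm n2,
          Ne.symm n3, Ne.symm n4, Ne.symm n5, Ne.symm n6, Ne.symm n7, Ne.symm n8,
          Ne.symm n9, Ne.symm n10, Ne.symm n11]

set_option maxHeartbeats 1000000 in
theorem pvNoEx {t L : List String} (h : ∀ x ∈ t, PySem.Str.lower x ∉ L)
    (he : ∃ x ∈ t, PySem.Str.lower x ∈ L) : False :=
  let ⟨x, hx, hp⟩ := he; h x hx hp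

theorem pvF_eq (l : List String) : pvF l =
    if ∃ x ∈ l, PySem.Str.lower x ∈ pvSecL then some (0, "security")
    else if ∃ x ∈ l, PySem.Str.lower x ∈ pvDocsL then some (1, "docs")
    else if ∃ x ∈ l, PySem.Str.lower x ∈ pvQaL then some (2, "qa")
    else none := by
  induction l with
  | nil => simp [pvF]
  | cons lbl t ih =>
    have hc : pvF (lbl :: t) = pvMerge (pvLk lbl) (pvF t) := by
      show List.foldl _ (pvMerge none (pvLk lbl)) t = _
      rw [pvMerge_none_left, pvFoldl_merge]
    rw [hc, pvLk_eq, ih]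
    simp only [List.exists_mem_cons_iff]
    split_ifs <;>
      try simp_all [pvMerge_some_some, pvMerge_none_left, pvMerge_none_right]
    all_goals
      first
        | exact pvNoEx (L := pvSecL) (by assumption) (by assumption)
        | exact pvNoEx (L := pvDocsL) (by assumption) (by assumption)
        | exact pvNoEx (L := pvQaL) (by assumption) (by assumption)

theorem pvInter_ne (xs S : List String) :
    (PySem.Set.inter (PySem.Set.ofList (xs.map PySem.Str.lower)) S ≠ []) ↔
    ∃ x ∈ xs, PySem.Str.lower x ∈ S := by
  rw [Ne, List.eq_nil_iff_forall_not_mem]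
  push Not
  constructor
  · rintro ⟨y, hy⟩
    rw [PySem.Set.mem_inter, PySem.Set.mem_ofList, List.mem_map] at hy
    obtain ⟨⟨x, hx, rfl⟩, hyS⟩ := hy
    exact ⟨x, hx, hyS⟩
  · rintro ⟨x, hx, hS⟩
    exact ⟨PySem.Str.lower x, by
      rw [PySem.Set.mem_inter, PySem.Set.mem_ofList, List.mem_map]
      exact ⟨⟨x, hx, rfl⟩, hS⟩⟩

theorem pvAlt_eq (labels : List String) :
    role_from_labels_py_alt labels =
      (match pvF labels with | some b => b.2 | none => "backend") := by
  unfold role_from_labels_py_alt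
  rw [pvStep_funext]
  rfl

-- ===== VERDICT (by name: the statement is the Claim_ definition above) =====
theorem role_from_labels_py_spec : Claim_equal_role_from_labels_py := by
  intro labels _
  unfold Spec_role_from_labels_py role_from_labels_py
  have c1 : (PySem.Set.inter (PySem.Set.ofList (labels.map PySem.Str.lower)) pvSecurityLabels ≠ []) ↔
      ∃ x ∈ labels, PySem.Str.lower x ∈ pvSecL := by
    rw [pvInter_ne]; unfold pvSecurityLabels; simp [PySem.Set.mem_ofList]
  have c2 : (PySem.Set.inter (PySem.Set.ofList (labels.map PySem.Str.lower)) pvDocsLabels ≠ []) ↔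
      ∃ x ∈ labels, PySem.Str.lower x ∈ pvDocsL := by
    rw [pvInter_ne]; unfold pvDocsLabels; simp [PySem.Set.mem_ofList]
  have c3 : (PySem.Set.inter (PySem.Set.ofList (labels.map PySem.Str.lower)) pvQaLabels ≠ []) ↔
      ∃ x ∈ labels, PySem.Str.lower x ∈ pvQaL := by
    rw [pvInter_ne]; unfold pvQaLabels; simp [PySem.Set.mem_ofList]
  rw [pvAlt_eq, pvF_eq]
  simp only [c1, c2, c3]
  split_ifs <;> rfl
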